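-- pv_equiv track=rewrite | github.com/GValiente/butano | butano/tools/mod2gbt/mod2gbt.py | mod_get_index_from_period
-- ===== SOURCE A (Python) =====
-- class RowConversionError(Exception):
--     def __init__(self, message, pattern = -1, row = -1, channel = -1):
--         self.pattern = pattern
--         self.row = row
--         self.channel = channel + 1
--         self.message = message
--
--     def __str__(self):
--         return f"Pattern {self.pattern} | Row {self.row} | Channel {self.channel} | {self.message}"
--
-- def mod_get_index_from_period(period):
--     if period <= 0:
--         return -1
--
--     mod_period = [
--         1712,1616,1524,1440,1356,1280,1208,1140,1076,1016, 960, 907,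
--         856, 808, 762, 720, 678, 640, 604, 570, 538, 508, 480, 453,
--         428, 404, 381, 360, 339, 320, 302, 285, 269, 254, 240, 226,
--         214, 202, 190, 180, 170, 160, 151, 143, 135, 127, 120, 113,
--         107, 101,  95,  90,  85,  80,  75,  71,  67,  63,  60,  56,
--         53,  50,  47,  45,  42,  40,  37,  35,  33,  31,  30,  28
--     ]
--
--     if period < mod_period[(6 * 12) - 1]:
--         raise RowConversionError("Note too high")
--     elif period > mod_period[0]:
--         raise RowConversionError("Note too low")
--
--     for i in range(0, 6 * 12):
--         if period == mod_period[i]: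
--             return i
--
--     # Couldn't find exact match... get nearest value
--
--     nearest_value = 0xFFFF
--     nearest_index = 0
--     for i in range(0, 6 * 12):
--         test_distance = abs(period - mod_period[i])
--         nearest_distance = abs(period - nearest_value)
--
--         if test_distance < nearest_distance:
--             nearest_value = mod_period[i]
--             nearest_index = i
--
--     return nearest_index
-- ===== SOURCE B (Python) =====
-- class RowConversionError(Exception):
--     def __init__(self, message, pattern = -1, row = -1, channel = -1):
--         self.pattern = pattern
--         self.row = row
--         self.channel = channel + 1
--         self.message = message
--
--     def __str__(self):
--         return f"Pattern {self.pattern} | Row {self.row} | Channel {self.channel} | {self.message}"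
--
-- def mod_get_index_from_period(period):
--     if period <= 0:
--         return -1
--
--     mod_period = [
--         1712,1616,1524,1440,1356,1280,1208,1140,1076,1016, 960, 907,
--         856, 808, 762, 720, 678, 640, 604, 570, 538, 508, 480, 453,
--         428, 404, 381, 360, 339, 320, 302, 285, 269, 254, 240, 226,
--         214, 202, 190, 180, 170, 160, 151, 143, 135, 127, 120, 113,
--         107, 101,  95,  90,  85,  80,  75,  71,  67,  63,  60,  56,
--         53,  50,  47,  45,  42,  40,  37,  35,  33,  31,  30,  28
--     ]
--
--     if period < mod_period[71]:
--         raise RowConversionError("Note too high")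
--     if period > mod_period[0]:
--         raise RowConversionError("Note too low")
--
--     # Binary search on the strictly descending table for the largest index lo
--     # with mod_period[lo] >= period, then pick the nearer of the two bracketing
--     # entries (the earlier index wins ties, as in the original's strict-< update).
--     lo, hi = 0, 71
--     while lo < hi:
--         mid = (lo + hi + 1) // 2
--         if mod_period[mid] >= period:
--             lo = mid
--         else:
--             hi = mid - 1
--     if lo == 71:
--         return 71
--     if mod_period[lo] - period <= period - mod_period[lo + 1]:
--         return lo
--     return lo + 1
-- ===== Notes on version B (the rewrite author's own statement) =====
-- stated objective: alternative
-- what changed: Replaces A's two linear scans over the 72-entry table (exact-match loop, then a sentinel-state nearest-value loop) by a binary search on the strictly descending table for the largest index with value >= period, followed by a comparison of the two bracketing entries (earlier index wins ties, matching A's strict-< update).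
import Mathlib
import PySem

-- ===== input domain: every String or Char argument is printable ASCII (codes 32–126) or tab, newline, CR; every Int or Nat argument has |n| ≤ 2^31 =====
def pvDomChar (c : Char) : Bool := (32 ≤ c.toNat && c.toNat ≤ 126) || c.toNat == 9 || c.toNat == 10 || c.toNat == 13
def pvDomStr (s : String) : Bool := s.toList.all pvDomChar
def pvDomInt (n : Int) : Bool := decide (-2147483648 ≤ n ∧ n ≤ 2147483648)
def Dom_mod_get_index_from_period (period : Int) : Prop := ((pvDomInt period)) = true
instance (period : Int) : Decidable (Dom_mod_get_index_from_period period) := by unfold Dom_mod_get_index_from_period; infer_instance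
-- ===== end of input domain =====

-- B replaces A's two sequential linear scans (exact match, then sentinel-state nearest
-- scan) by a binary search on the strictly descending table followed by a comparison
-- of the two bracketing entries (objective: alternative).
-- ===== PORT A =====
def modPeriodTable : List Int := [
    1712,1616,1524,1440,1356,1280,1208,1140,1076,1016, 960, 907,
    856, 808, 762, 720, 678, 640, 604, 570, 538, 508, 480, 453,
    428, 404, 381, 360, 339, 320, 302, 285, 269, 254, 240, 226,
    214, 202, 190, 180, 170, 160, 151, 143, 135, 127, 120, 113,
    107, 101,  95,  90,  85,  80,  75,  71,  67,  63,  60,  56,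
    53,  50,  47,  45,  42,  40,  37,  35,  33,  31,  30,  28]

-- A's second loop body: state (nearest_value, nearest_index)
def nearestStep (period : Int) (st : Int × Int) (i : Int) : Int × Int :=
  let test_distance := |period - PySem.List.pyGetD modPeriodTable i 0|
  let nearest_distance := |period - st.1|
  if test_distance < nearest_distance then (PySem.List.pyGetD modPeriodTable i 0, i) else st

-- A: first loop = for-with-early-return (find?); second loop = foldl with nearestStep.
-- The two `raise RowConversionError` points are excluded by Pre_; the port returns 0 there (unclaimed).
def mod_get_index_from_period (period : Int) : Int :=
  if period ≤ 0 then -1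
  else if period < PySem.List.pyGetD modPeriodTable 71 0 then 0  -- raise "Note too high", excluded by Pre_
  else if period > PySem.List.pyGetD modPeriodTable 0 0 then 0   -- raise "Note too low", excluded by Pre_
  else
    match (PySem.List.pyRange 0 72 1).find? (fun i => period == PySem.List.pyGetD modPeriodTable i 0) with
    | some i => i
    | none => ((PySem.List.pyRange 0 72 1).foldl (nearestStep period) (65535, 0)).2

-- ===== PORT B =====
-- B's while-loop: binary search for the largest lo with table[lo] >= period.
-- The fuel argument only bounds the iteration count (hi - lo shrinks by at least
-- half each step, so 72 iterations always suffice for the 72-entry table).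
def bsLoop : Nat → Int → Int → Int → Int
  | 0, _, lo, _ => lo
  | fuel + 1, period, lo, hi =>
    if lo < hi then
      let mid := PySem.Int.floordiv (lo + hi + 1) 2
      if PySem.List.pyGetD modPeriodTable mid 0 ≥ period then bsLoop fuel period mid hi
      else bsLoop fuel period lo (mid - 1)
    else lo

def mod_get_index_from_period_alt (period : Int) : Int :=
  if period ≤ 0 then -1
  else if period < PySem.List.pyGetD modPeriodTable 71 0 then 0  -- raise, excluded by Pre_
  else if period > PySem.List.pyGetD modPeriodTable 0 0 then 0   -- raise, excluded by Pre_
  else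
    let lo := bsLoop 72 period 0 71
    if lo = 71 then 71
    else if PySem.List.pyGetD modPeriodTable lo 0 - period ≤
            period - PySem.List.pyGetD modPeriodTable (lo + 1) 0 then lo
    else lo + 1

-- ===== PRECONDITION & SPEC =====
-- Pre_ excludes exactly the inputs on which A raises RowConversionError: 0 < period < 28 or period > 1712.
def Pre_mod_get_index_from_period (period : Int) : Prop :=
  period ≤ 0 ∨ (28 ≤ period ∧ period ≤ 1712)
instance (period : Int) : Decidable (Pre_mod_get_index_from_period period) := by
  unfold Pre_mod_get_index_from_period; infer_instance
def pvWitness_mod_get_index_from_period : Int := 453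
def Spec_mod_get_index_from_period (period : Int) (out : Int) : Prop := out = mod_get_index_from_period_alt period
instance (period : Int) (out : Int) : Decidable (Spec_mod_get_index_from_period period out) := by unfold Spec_mod_get_index_from_period; infer_instance

-- ===== CLAIM (what is proved, stated in full; the proofs are below) =====
def Claim_equal_mod_get_index_from_period : Prop := ∀ (period : Int), Dom_mod_get_index_from_period period → Pre_mod_get_index_from_period period → Spec_mod_get_index_from_period period (mod_get_index_from_period period)

-- ===== LEMMAS AND PROOFS =====

-- proof-side abbreviation for table lookup
def gT (i : Int) : Int := PySem.List.pyGetD modPeriodTable i 0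

lemma g_desc : ∀ i ∈ PySem.List.pyRange 0 71, gT (i + 1) < gT i := by decide

lemma g_mono_aux : ∀ (n : Nat) (i : Int), 0 ≤ i → i + 1 + n ≤ 71 → gT (i + 1 + n) < gT i := by
  intro n
  induction n with
  | zero =>
    intro i h0 h71
    have := g_desc i (PySem.List.mem_pyRange_one.mpr (by omega))
    simpa using this
  | succ n ih =>
    intro i h0 h71
    have h1 : gT (i + 1) < gT i := by
      have := g_desc i (PySem.List.mem_pyRange_one.mpr (by omega))
      simpa using this
    have h2 : gT ((i + 1) + 1 + n) < gT (i + 1) := ih (i + 1) (by omega) (by omega)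
    have he : i + 1 + (((n : Nat) + 1 : Nat) : Int) = (i + 1) + 1 + (n : Int) := by push_cast; ring
    rw [he]
    exact lt_trans h2 h1

lemma g_mono_strict {i j : Int} (h0 : 0 ≤ i) (hij : i < j) (h71 : j ≤ 71) : gT j < gT i := by
  have hn : ((j - i - 1).toNat : Int) = j - i - 1 := Int.toNat_of_nonneg (by omega)
  have he : j = i + 1 + ((j - i - 1).toNat : Int) := by omega
  rw [he]
  exact g_mono_aux (j - i - 1).toNat i h0 (by omega)

lemma g_mono_le {i j : Int} (h0 : 0 ≤ i) (hij : i ≤ j) (h71 : j ≤ 71) : gT j ≤ gT i := by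
  rcases eq_or_lt_of_le hij with h | h
  · rw [h]
  · exact le_of_lt (g_mono_strict h0 h h71)

lemma g_zero : gT 0 = 1712 := by decide
lemma g_last : gT 71 = 28 := by decide

-- binary-search invariant: bsLoop lands on the largest index with table value ≥ p
lemma bs_inv (p : Int) : ∀ (fuel : Nat) (lo hi : Int), 0 ≤ lo → lo ≤ hi → hi ≤ 71 →
    p ≤ gT lo → (hi = 71 ∨ gT (hi + 1) < p) → (hi - lo).toNat ≤ fuel →
    0 ≤ bsLoop fuel p lo hi ∧ bsLoop fuel p lo hi ≤ 71 ∧ p ≤ gT (bsLoop fuel p lo hi) ∧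
      (bsLoop fuel p lo hi = 71 ∨ gT (bsLoop fuel p lo hi + 1) < p) := by
  intro fuel
  induction fuel with
  | zero =>
    intro lo hi h0 hlh h71 hglo hhi hf
    have : lo = hi := by omega
    simp only [bsLoop]
    exact ⟨h0, by omega, hglo, this ▸ hhi⟩
  | succ fuel ih =>
    intro lo hi h0 hlh h71 hglo hhi hf
    simp only [bsLoop]
    by_cases hc : lo < hi
    · rw [if_pos hc]
      have hmid := PySem.Int.floordiv_two_mid_bounds (lo := lo + 1) (hi := hi) (by omega)
      have he : lo + 1 + hi = lo + hi + 1 := by ring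
      rw [he] at hmid
      by_cases hg : PySem.List.pyGetD modPeriodTable (PySem.Int.floordiv (lo + hi + 1) 2) 0 ≥ p
      · rw [if_pos hg]
        exact ih _ hi (by omega) (by omega) h71 hg hhi (by omega)
      · rw [if_neg hg]
        refine ih lo _ h0 (by omega) (by omega) hglo (Or.inr ?_) (by omega)
        have : PySem.Int.floordiv (lo + hi + 1) 2 - 1 + 1 = PySem.Int.floordiv (lo + hi + 1) 2 := by ring
        rw [this]
        exact lt_of_not_ge hg
    · rw [if_neg hc]
      have : lo = hi := by omega
      exact ⟨h0, by omega, hglo, this ▸ hhi⟩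

-- A's nearest fold ignores every index whose distance is not strictly smaller
lemma fold_const (p v b : Int) : ∀ l : List Int, (∀ i ∈ l, ¬ (|p - gT i| < |p - v|)) →
    l.foldl (nearestStep p) (v, b) = (v, b) := by
  intro l
  induction l with
  | nil => intro _; rfl
  | cons i t ih =>
    intro h
    simp only [List.foldl_cons, nearestStep]
    rw [show PySem.List.pyGetD modPeriodTable i 0 = gT i from rfl, if_neg (h i (by simp))]
    exact ih (fun j hj => h j (by simp [hj]))

-- A's nearest fold marches down the descending prefix, ending at its last index
lemma fold_prefix (p : Int) (h1 : 28 ≤ p) (h2 : p ≤ 1712) :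
    ∀ (n : Nat), (n : Int) ≤ 71 → p ≤ gT n →
    (PySem.List.pyRange 0 ((n : Int) + 1)).foldl (nearestStep p) (65535, 0) = (gT n, (n : Int)) := by
  intro n
  induction n with
  | zero =>
    intro _ hg
    have hr : PySem.List.pyRange 0 (((0 : Nat) : Int) + 1) = [0] := by decide
    rw [hr]
    simp only [List.foldl_cons, List.foldl_nil, nearestStep]
    rw [show PySem.List.pyGetD modPeriodTable 0 0 = (1712 : Int) from rfl]
    rw [if_pos]
    · rfl
    · rw [abs_of_nonpos (by omega : p - 1712 ≤ 0), abs_of_nonpos (by omega : p - 65535 ≤ 0)]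
      omega
  | succ n ih =>
    intro h71 hg
    have hc : (((n : Nat) + 1 : Nat) : Int) = (n : Int) + 1 := by push_cast; ring
    rw [hc] at h71 hg ⊢
    have hgn : p ≤ gT n := le_trans hg (le_of_lt (g_mono_strict (by positivity) (by omega) (by omega)))
    have hsplit : PySem.List.pyRange 0 ((n : Int) + 1 + 1) =
        PySem.List.pyRange 0 ((n : Int) + 1) ++ [(n : Int) + 1] := by
      exact PySem.List.pyRange_one_succ_right (by positivity)
    rw [hsplit, List.foldl_append, ih (by omega) hgn]
    simp only [List.foldl_cons, List.foldl_nil, nearestStep]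
    rw [show PySem.List.pyGetD modPeriodTable ((n : Int) + 1) 0 = gT ((n : Int) + 1) from rfl]
    have hlt : gT ((n : Int) + 1) < gT n := g_mono_strict (by positivity) (by omega) (by omega)
    have habs1 : |p - gT ((n : Int) + 1)| = gT ((n : Int) + 1) - p := by
      rw [abs_of_nonpos (by omega)]; ring
    have habs2 : |p - gT n| = gT n - p := by rw [abs_of_nonpos (by omega)]; ring
    rw [habs1, habs2, if_pos (by omega)]

-- find? characterizations
lemma find_exact (p K : Int) (h0 : 0 ≤ K) (h71 : K ≤ 71) (hx : p = gT K) :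
    (PySem.List.pyRange 0 72).find? (fun i => p == PySem.List.pyGetD modPeriodTable i 0) = some K := by
  have hsplit := PySem.List.pyRange_one_append 0 K 72 h0 (by omega)
  rw [hsplit, List.find?_append]
  have hpre : (PySem.List.pyRange 0 K).find? (fun i => p == PySem.List.pyGetD modPeriodTable i 0) = none := by
    apply List.find?_eq_none.mpr
    intro i hi
    have hi' := PySem.List.mem_pyRange_one.mp hi
    have : gT K < gT i := g_mono_strict (by omega) (by omega) h71
    simp only [beq_iff_eq]
    rw [hx]
    intro hh
    exact absurd (hh ▸ this) (lt_irrefl _)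
  rw [hpre]
  rw [PySem.List.pyRange_one_cons (by omega : K < 72)]
  simp only [Option.none_or]
  have hbeq : (fun i => p == PySem.List.pyGetD modPeriodTable i 0) K = true := by
    simp only [beq_iff_eq]
    rw [hx]; rfl
  simp only [List.find?_cons, hbeq]

lemma find_none (p K : Int) (h0 : 0 ≤ K) (h71 : K ≤ 71) (hup : p < gT K)
    (hdn : K = 71 ∨ gT (K + 1) < p) (hK71 : K < 71) :
    (PySem.List.pyRange 0 72).find? (fun i => p == PySem.List.pyGetD modPeriodTable i 0) = none := by
  apply List.find?_eq_none.mpr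
  intro i hi
  have hi' := PySem.List.mem_pyRange_one.mp hi
  rcases hdn with h | h
  · omega
  simp only [beq_iff_eq]
  intro hh
  have hh' : p = gT i := hh
  by_cases hik : i ≤ K
  · have : gT K ≤ gT i := g_mono_le (by omega) hik h71
    omega
  · have : gT i ≤ gT (K + 1) := g_mono_le (by omega) (by omega) (by omega)
    omega

-- ===== VERDICT (by name: the statement is the Claim_ definition above) =====
theorem mod_get_index_from_period_spec : Claim_equal_mod_get_index_from_period := by
  intro p _ hpre
  unfold Spec_mod_get_index_from_period
  rcases hpre with h | ⟨h1, h2⟩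
  · simp [mod_get_index_from_period, mod_get_index_from_period_alt, h]
  · have e71 : PySem.List.pyGetD modPeriodTable 71 0 = 28 := by decide
    have e0 : PySem.List.pyGetD modPeriodTable 0 0 = 1712 := by decide
    have hnp : ¬ p ≤ 0 := by omega
    have hlt : ¬ p < PySem.List.pyGetD modPeriodTable 71 0 := by rw [e71]; omega
    have hgt : ¬ p > PySem.List.pyGetD modPeriodTable 0 0 := by rw [e0]; omega
    unfold mod_get_index_from_period mod_get_index_from_period_alt
    rw [if_neg hnp, if_neg hlt, if_neg hgt, if_neg hnp, if_neg hlt, if_neg hgt]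
    obtain ⟨hK0, hK71, hKup, hKdn⟩ := bs_inv p 72 0 71 le_rfl (by omega) le_rfl
      (by rw [show gT 0 = 1712 from g_zero]; omega) (Or.inl rfl) (by omega)
    set K := bsLoop 72 p 0 71 with hKdef
    by_cases hx : p = gT K
    · -- exact match: A's find? fires at K; B's bracket pick returns K too
      rw [find_exact p K hK0 hK71 hx]
      by_cases hk71 : K = 71
      · rw [if_pos hk71, hk71]
      · rw [if_neg hk71]
        rw [if_pos]
        have hlt' : gT (K + 1) < p := hKdn.resolve_left hk71
        rw [show PySem.List.pyGetD modPeriodTable K 0 = gT K from rfl,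
            show PySem.List.pyGetD modPeriodTable (K + 1) 0 = gT (K + 1) from rfl]
        omega
    · -- no exact match: A's fold lands on the nearer bracket, as B computes
      have hup : p < gT K := lt_of_le_of_ne hKup hx
      have hk71 : K < 71 := by
        rcases lt_or_eq_of_le hK71 with h | h
        · exact h
        · exfalso; rw [h] at hup; rw [g_last] at hup; omega
      have hdn : gT (K + 1) < p := hKdn.resolve_left (by omega)
      rw [find_none p K hK0 hK71 hup hKdn hk71]
      rw [if_neg (by omega : ¬ K = 71)]
      -- split the fold at K+1
      have hsplit := PySem.List.pyRange_one_append 0 (K + 1) 72 (by omega) (by omega)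
      rw [hsplit, List.foldl_append]
      have hKnat : ((K.toNat : Nat) : Int) = K := Int.toNat_of_nonneg hK0
      have hprefix : (PySem.List.pyRange 0 (K + 1)).foldl (nearestStep p) (65535, 0) = (gT K, K) := by
        have := fold_prefix p h1 h2 K.toNat (by omega) (by rw [hKnat]; exact hKup)
        rw [hKnat] at this
        exact this
      rw [hprefix]
      rw [PySem.List.pyRange_one_cons (by omega : K + 1 < 72)]
      simp only [List.foldl_cons]
      have ha1 : |p - gT (K + 1)| = p - gT (K + 1) := by
        rw [abs_of_nonneg (by omega)]
      have ha2 : |p - gT K| = gT K - p := by rw [abs_of_nonpos (by omega)]; ring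
      rw [show PySem.List.pyGetD modPeriodTable K 0 = gT K from rfl,
          show PySem.List.pyGetD modPeriodTable (K + 1) 0 = gT (K + 1) from rfl]
      by_cases hcmp : gT K - p ≤ p - gT (K + 1)
      · -- B returns K; A keeps (gT K, K) through the whole suffix
        rw [if_pos hcmp]
        have hstep : nearestStep p (gT K, K) (K + 1) = (gT K, K) := by
          simp only [nearestStep]
          rw [show PySem.List.pyGetD modPeriodTable (K + 1) 0 = gT (K + 1) from rfl]
          rw [if_neg (by rw [ha1, ha2]; omega)]
        rw [hstep]
        rw [fold_const p (gT K) K _ ?_]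
        intro i hi
        have hi' := PySem.List.mem_pyRange_one.mp hi
        have hgi : gT i < gT (K + 1) := g_mono_strict (by omega) (by omega) (by omega)
        rw [ha2, abs_of_nonneg (by omega : (0:Int) ≤ p - gT i)]
        omega
      · -- B returns K+1; A updates at K+1 then keeps it
        rw [if_neg hcmp]
        have hstep : nearestStep p (gT K, K) (K + 1) = (gT (K + 1), K + 1) := by
          simp only [nearestStep]
          rw [show PySem.List.pyGetD modPeriodTable (K + 1) 0 = gT (K + 1) from rfl]
          rw [if_pos (by rw [ha1, ha2]; omega)]
        rw [hstep]
        rw [fold_const p (gT (K + 1)) (K + 1) _ ?_]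
        intro i hi
        have hi' := PySem.List.mem_pyRange_one.mp hi
        have hgi : gT i < gT (K + 1) := g_mono_strict (by omega) (by omega) (by omega)
        rw [ha1, abs_of_nonneg (by omega : (0:Int) ≤ p - gT i)]
        omega
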